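-- pv_equiv track=rewrite | github.com/douglasacmartins/dummy-package | src/dummy_package/check_delimiter.py | check_delimiter
-- ===== SOURCE A (Python) =====
-- from collections import Counter
--
-- def check_delimiter(data_sample: list) -> str:
--     """
--         Check separator from any text data sample
--     """
--     common_delimiter = list(',;:|\t')
--     struct_counter = Counter()
--     counter = Counter()
--     for i, line in enumerate(data_sample, 1):
--         if isinstance(line, bytes):
--             line = line.decode('utf-8', 'replace')
--         delimiter_count = dict(
--             zip(
--                 common_delimiter,
--                 map(line.count, common_delimiter)
--             )
--         )
--         struct_counter.update(delimiter_count.items())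
--         counter.update(delimiter_count)
--     else:
--         num_of_lines = i
--
--     for k, v in struct_counter.items():
--         # Remove any delimiter that is not present in every line
--         # Any error raised means that the value has already been removed
--         if v != num_of_lines or k[1] == 0:
--             try:
--                 counter.pop(k[0])
--             except KeyError:
--                 pass
--     return counter.most_common(1)[0][0]
-- ===== SOURCE B (Python) =====
-- def check_delimiter(data_sample: list) -> str:
--     """
--         Check separator from any text data sample
--     """
--     survivors = []
--     for d in ',;:|\t':
--         counts = [
--             (line.decode('utf-8', 'replace') if isinstance(line, bytes) else line).count(d)
--             for line in data_sample
--         ]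
--         if counts and len(set(counts)) == 1 and counts[0] != 0:
--             survivors.append((d, sum(counts)))
--     return max(survivors, key=lambda t: t[1])[0]
-- ===== Notes on version B (the rewrite author's own statement) =====
-- stated objective: simpler
-- what changed: Replaces A's line-major pass that feeds two Counters (per-(delimiter,count) multiplicities and totals) followed by a pop-based removal loop and most_common(1) with a single delimiter-major pass: for each of the five delimiters build its per-line count list once, keep it if the counts are all equal and nonzero, and return the first survivor of maximal total via max(key=...).
-- outside the precondition, e.g. on check_delimiter([]): A raises UnboundLocalError, B raises ValueError; on check_delimiter(['a']): A raises IndexError, B raises ValueError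
import Mathlib
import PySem

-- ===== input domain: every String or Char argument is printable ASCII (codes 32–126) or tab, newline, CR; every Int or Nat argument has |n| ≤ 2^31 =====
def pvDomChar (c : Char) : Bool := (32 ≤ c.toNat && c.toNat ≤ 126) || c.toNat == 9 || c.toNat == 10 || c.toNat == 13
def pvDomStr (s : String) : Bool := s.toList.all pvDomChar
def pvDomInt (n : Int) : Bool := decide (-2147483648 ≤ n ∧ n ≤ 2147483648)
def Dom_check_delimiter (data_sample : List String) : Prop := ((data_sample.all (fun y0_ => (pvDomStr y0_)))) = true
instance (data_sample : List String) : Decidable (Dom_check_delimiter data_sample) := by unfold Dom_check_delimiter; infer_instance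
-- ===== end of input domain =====

-- B re-groups the work delimiter-major (per-delimiter count lists, all-equal-and-nonzero test,
-- first max) instead of A's line-major Counter bookkeeping with pop; objective: simpler.


-- ===== PORT A =====
-- common_delimiter = list(',;:|\t'); delimiters kept as one-char strings (line.count counts substrings)
def pvCommonDelimiter : List String := [",", ";", ":", "|", "\t"]

-- delimiter_count = dict(zip(common_delimiter, map(line.count, common_delimiter))), as its items list
def pvDelimiterCount (line : String) : List (String × Int) :=
  pvCommonDelimiter.map (fun d => (d, (PySem.Str.count line d : Int)))

-- one iteration of 'for i, line in enumerate(data_sample, 1)'; state = (struct_counter, counter, i)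
def pvStepA (st : PySem.Dict (String × Int) Int × PySem.Dict String Int × Int) (line : String) :
    PySem.Dict (String × Int) Int × PySem.Dict String Int × Int :=
  let delimiter_count := pvDelimiterCount line
  -- struct_counter.update(delimiter_count.items()): each (k, c) tuple counted once
  (delimiter_count.foldl (fun d x => d.modify x 0 (· + 1)) st.1,
  -- counter.update(delimiter_count): adds each value to its key
   delimiter_count.foldl (fun d p => d.modify p.1 0 (· + p.2)) st.2.1,
   st.2.2 + 1)

-- body of the removal loop: 'try: counter.pop(k[0]) except KeyError: pass'
def pvEraseStep (num_of_lines : Int) (c : PySem.Dict String Int) (kv : (String × Int) × Int) :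
    PySem.Dict String Int :=
  if kv.2 ≠ num_of_lines ∨ kv.1.2 = 0 then
    match c.pop? kv.1.1 with
    | some (_, c') => c'
    | none => c
  else c

-- counter.most_common(1)[0][0]: first key of maximal count (stable); [] = IndexError, outside Pre_
def pvMostCommonHead (c : PySem.Dict String Int) : String :=
  match c.items with
  | [] => ""
  | p :: rest => (rest.foldl (fun best q => if best.2 < q.2 then q else best) p).1

def check_delimiter (data_sample : List String) : String :=
  let st := data_sample.foldl pvStepA (PySem.Dict.empty, PySem.Dict.empty, 0)
  let num_of_lines := st.2.2
  pvMostCommonHead (st.1.items.foldl (pvEraseStep num_of_lines) st.2.1)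

-- ===== PORT B =====
-- counts = [line.count(d) for line in data_sample]
def pvCounts (data_sample : List String) (d : String) : List Int :=
  data_sample.map (fun line => (PySem.Str.count line d : Int))

-- loop body: keep d iff its per-line counts are all equal and nonzero
def pvSurvStep (data_sample : List String) (acc : List (String × Int)) (d : String) :
    List (String × Int) :=
  let counts := pvCounts data_sample d
  if counts ≠ [] ∧ PySem.Set.len (PySem.Set.ofList counts) = 1 ∧ PySem.List.pyGetD counts 0 0 ≠ 0 then
    acc ++ [(d, counts.sum)]
  else acc

def check_delimiter_alt (data_sample : List String) : String :=
  let survivors := [",", ";", ":", "|", "\t"].foldl (pvSurvStep data_sample) []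
  -- max(survivors, key=lambda t: t[1])[0]; ValueError on empty survivors, outside Pre_
  (PySem.List.maxD survivors (fun t => t.2) ("", 0)).1

-- ===== PRECONDITION & SPEC =====
-- Pre_ excludes exactly the inputs where Python A raises: the empty list (UnboundLocalError on
-- num_of_lines) and samples with no delimiter occurring a constant nonzero number of times per
-- line (IndexError on most_common(1)[0]); Python B raises there too (ValueError from max([])).
def Pre_check_delimiter (data_sample : List String) : Prop :=
  data_sample ≠ [] ∧
  ∃ d ∈ [",", ";", ":", "|", "\t"],
    (∀ line ∈ data_sample, PySem.Str.count line d = PySem.Str.count (data_sample.headD "") d) ∧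
    PySem.Str.count (data_sample.headD "") d ≠ 0
instance (data_sample : List String) : Decidable (Pre_check_delimiter data_sample) := by
  unfold Pre_check_delimiter; infer_instance

def pvWitness_check_delimiter : List String := ["a,b", "c,d"]

def Spec_check_delimiter (data_sample : List String) (out : String) : Prop := out = check_delimiter_alt data_sample
instance (data_sample : List String) (out : String) : Decidable (Spec_check_delimiter data_sample out) := by unfold Spec_check_delimiter; infer_instance

-- ===== CLAIM (what is proved, stated in full; the proofs are below) =====
def Claim_equal_check_delimiter : Prop := ∀ (data_sample : List String), Dom_check_delimiter data_sample → Pre_check_delimiter data_sample → Spec_check_delimiter data_sample (check_delimiter data_sample)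

-- ===== LEMMAS AND PROOFS =====

-- the flattened items stream A's two Counters are fed with
def pvStream (data_sample : List String) : List (String × Int) :=
  data_sample.flatMap pvDelimiterCount

theorem pv_stream_cons (line : String) (tl : List String) :
    pvStream (line :: tl) = pvDelimiterCount line ++ pvStream tl := by
  simp [pvStream]

theorem pv_counts_cons (line : String) (tl : List String) (d : String) :
    pvCounts (line :: tl) d = (PySem.Str.count line d : Int) :: pvCounts tl d := rfl

-- 1. loop fusion: the enumerate-loop is the two Counter folds over the flattened stream
theorem pv_fold_fuse (xs : List String) (s : PySem.Dict (String × Int) Int)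
    (c : PySem.Dict String Int) (i : Int) :
    xs.foldl pvStepA (s, c, i) =
      ((pvStream xs).foldl (fun d x => d.modify x 0 (· + 1)) s,
       (pvStream xs).foldl (fun d p => d.modify p.1 0 (· + p.2)) c,
       i + xs.length) := by
  induction xs generalizing s c i with
  | nil => simp [pvStream]
  | cons hd tl ih =>
      simp only [List.foldl_cons, pvStream, List.flatMap_cons, List.foldl_append, pvStepA] at *
      rw [ih]
      refine Prod.ext rfl (Prod.ext rfl ?_)
      simp
      ring

-- 2. the pop/except-KeyError body is Dict.erase
theorem pv_pop_match_eq_erase (c : PySem.Dict String Int) (k : String) :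
    (match c.pop? k with
     | some (_, c') => c'
     | none => c) = c.erase k := by
  unfold PySem.Dict.pop?
  cases h : c.get? k with
  | some v => simp
  | none =>
      simp only [Option.map_none]
      have hk : k ∉ c.keys := (PySem.Dict.get?_eq_none_iff_not_mem_keys c k).mp h
      apply PySem.Dict.ext
      show c.items = c.items.filter (fun p => !(p.1 == k))
      symm
      rw [List.filter_eq_self]
      intro p hp
      simp only [Bool.not_eq_eq_eq_not, Bool.not_true, beq_eq_false_iff_ne, ne_eq]
      intro hpk
      exact hk (hpk ▸ PySem.Dict.mem_keys_of_mem_items c hp)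

-- 3. the removal loop filters the counter's items
theorem pv_erase_fold (l : List ((String × Int) × Int)) (n : Int) (c : PySem.Dict String Int) :
    (l.foldl (pvEraseStep n) c).items =
      c.items.filter
        (fun p => !(l.any (fun kv => (decide (kv.2 ≠ n) || decide (kv.1.2 = 0)) && kv.1.1 == p.1))) := by
  induction l generalizing c with
  | nil => simp
  | cons kv l ih =>
      rw [List.foldl_cons, ih]
      by_cases h : kv.2 ≠ n ∨ kv.1.2 = 0
      · have hstep : pvEraseStep n c kv = c.erase kv.1.1 := by
          simp only [pvEraseStep, if_pos h, pv_pop_match_eq_erase]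
        have hb : (decide (kv.2 ≠ n) || decide (kv.1.2 = 0)) = true := by
          rcases h with h | h <;> simp [h]
        rw [hstep]
        show List.filter _ (c.items.filter (fun p => !(p.1 == kv.1.1))) = _
        rw [List.filter_filter]
        apply List.filter_congr
        intro p _
        simp only [List.any_cons, hb, Bool.true_and, Bool.not_or, BEq.comm (a := kv.1.1) (b := p.1)]
        exact Bool.and_comm _ _
      · have hstep : pvEraseStep n c kv = c := by
          simp only [pvEraseStep, if_neg h]
        have hb : (decide (kv.2 ≠ n) || decide (kv.1.2 = 0)) = false := by
          push Not at h
          simp [h.1, h.2]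
        rw [hstep]
        apply List.filter_congr
        intro p _
        simp only [List.any_cons, hb, Bool.false_and, Bool.false_or]

-- 4. value of A's totals counter
theorem pv_getD_modify_snd (l : List (String × Int)) (c : PySem.Dict String Int) (k : String) :
    (l.foldl (fun d p => d.modify p.1 0 (· + p.2)) c).getD k 0 =
      c.getD k 0 + ((l.filter (fun p => p.1 == k)).map (·.2)).sum := by
  induction l generalizing c with
  | nil => simp
  | cons q l ih =>
      rw [List.foldl_cons, ih, PySem.Dict.getD_modify]
      by_cases hk : k = q.1
      · have hq : (q.1 == k) = true := by simp [hk]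
        subst hk
        simp only [List.filter_cons, BEq.refl, if_pos, List.map_cons, List.sum_cons]
        ring
      · have hq : (q.1 == k) = false := by simpa using Ne.symm hk
        simp only [List.filter_cons, hq, if_neg hk, Bool.false_eq_true, if_false]

-- filtering the per-line items at a known delimiter
theorem pv_lineItems_filter (d : String) (hd : d ∈ pvCommonDelimiter) (line : String) :
    (pvDelimiterCount line).filter (fun p => p.1 == d) = [(d, (PySem.Str.count line d : Int))] := by
  simp only [pvCommonDelimiter, List.mem_cons, List.not_mem_nil, or_false] at hd
  rcases hd with h | h | h | h | h <;> subst h <;> rfl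

theorem pv_stream_filter (d : String) (hd : d ∈ pvCommonDelimiter) (ds : List String) :
    (pvStream ds).filter (fun p => p.1 == d) = (pvCounts ds d).map (fun c => (d, c)) := by
  induction ds with
  | nil => rfl
  | cons line tl ih =>
      rw [pv_stream_cons, List.filter_append, pv_lineItems_filter d hd line, ih, pv_counts_cons]
      simp

-- multiplicity of an item in the stream
theorem pv_stream_count (d : String) (hd : d ∈ pvCommonDelimiter) (c : Int) (ds : List String) :
    (pvStream ds).count (d, c) = (pvCounts ds d).count c := by
  have h1 : (pvStream ds).count (d, c) = ((pvStream ds).filter (fun p => p.1 == d)).count (d, c) := by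
    rw [List.count_filter]
    simp
  rw [h1, pv_stream_filter d hd ds, List.count_map_of_injective]
  intro a b hab
  simpa using hab

-- membership of an item in the stream
theorem pv_mem_stream (p : String × Int) (ds : List String) :
    p ∈ pvStream ds ↔ p.1 ∈ pvCommonDelimiter ∧ p.2 ∈ pvCounts ds p.1 := by
  cases p with
  | mk d c =>
      simp only [pvStream, List.mem_flatMap, pvDelimiterCount, List.mem_map, pvCounts]
      constructor
      · rintro ⟨line, hline, d', hd', heq⟩
        cases heq
        exact ⟨hd', line, hline, rfl⟩
      · rintro ⟨hd', line, hline, hc⟩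
        exact ⟨line, hline, d, hd', by rw [hc]⟩

-- a Nodup list whose members all equal x, containing x, is [x]
theorem pv_nodup_all_eq {s : List Int} {x : Int} (hnd : s.Nodup) (hall : ∀ b ∈ s, b = x)
    (hx : x ∈ s) : s = [x] := by
  cases s with
  | nil => cases hx
  | cons a u =>
      have hax : a = x := hall a (List.mem_cons_self ..)
      subst hax
      have hu : u = [] := by
        cases u with
        | nil => rfl
        | cons b v =>
            have hb : b = a := hall b (by simp)
            rw [List.nodup_cons] at hnd
            exact absurd (hb ▸ List.mem_cons_self ..) hnd.1
      rw [hu]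

-- the survive condition of A equals the survive condition of B (nonempty list of counts)
theorem pv_allcount_iff (l : List Int) (hlne : l ≠ []) :
    (¬ ∃ c ∈ l, ((l.count c : Int) ≠ (l.length : Int) ∨ c = 0)) ↔
      (l ≠ [] ∧ PySem.Set.len (PySem.Set.ofList l) = 1 ∧ PySem.List.pyGetD l 0 0 ≠ 0) := by
  obtain ⟨x, t, rfl⟩ := List.exists_cons_of_ne_nil hlne
  have hx : x ∈ x :: t := List.mem_cons_self ..
  rw [PySem.List.pyGetD_zero_cons]
  constructor
  · intro h
    push Not at h
    have hcx := h x hx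
    have hall : ∀ b ∈ x :: t, b = x := by
      intro b hb
      exact (List.count_eq_length.mp (by exact_mod_cast hcx.1) b hb).symm
    have hofl : PySem.Set.ofList (x :: t) = [x] :=
      pv_nodup_all_eq (PySem.Set.nodup_ofList _)
        (fun b hb => hall b ((PySem.Set.mem_ofList _ b).mp hb))
        ((PySem.Set.mem_ofList _ x).mpr hx)
    exact ⟨hlne, by rw [hofl]; rfl, hcx.2⟩
  · rintro ⟨-, hlen1, hx0⟩
    rintro ⟨c, hc, hbad⟩
    have hone : (PySem.Set.ofList (x :: t)).length = 1 := by
      have := hlen1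
      simp only [PySem.Set.len] at this
      exact_mod_cast this
    obtain ⟨y, hy⟩ := List.length_eq_one_iff.mp hone
    have hmem : ∀ b ∈ x :: t, b = y := by
      intro b hb
      have := (PySem.Set.mem_ofList _ b).mpr hb
      rw [hy] at this
      simpa using this
    have hcy := hmem c hc
    have hxy := hmem x hx
    rcases hbad with hbad | hbad
    · apply hbad
      have : List.count c (x :: t) = (x :: t).length :=
        List.count_eq_length.mpr (fun b hb => by rw [hcy, hmem b hb])
      exact_mod_cast this
    · exact hx0 (by rw [hxy, ← hcy, hbad])

theorem pv_cond_iff (ds : List String) (hne : ds ≠ []) (d : String) :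
    (¬ ∃ c ∈ pvCounts ds d, ((pvCounts ds d).count c : Int) ≠ (ds.length : Int) ∨ c = 0) ↔
      (pvCounts ds d ≠ [] ∧ PySem.Set.len (PySem.Set.ofList (pvCounts ds d)) = 1 ∧
        PySem.List.pyGetD (pvCounts ds d) 0 0 ≠ 0) := by
  have hlen : ((pvCounts ds d).length : Int) = (ds.length : Int) := by simp [pvCounts]
  have hlne : pvCounts ds d ≠ [] := by simp [pvCounts, hne]
  simpa only [hlen] using pv_allcount_iff (pvCounts ds d) hlne

-- first-max scan of A equals PySem.List.max?
theorem pv_first_max (p : String × Int) (rest : List (String × Int)) :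
    PySem.List.max? (p :: rest) (fun t => t.2) =
      some (rest.foldl (fun best q => if best.2 < q.2 then q else best) p) := by
  induction rest generalizing p with
  | nil => rfl
  | cons q l ih =>
      show PySem.List.max? (p :: q :: l) (fun t => t.2) = _
      rw [List.foldl_cons]
      by_cases hpq : p.2 < q.2
      · rw [if_pos hpq, ← ih q]
        unfold PySem.List.max?
        rw [List.foldl_cons, List.foldl_cons, List.foldl_cons]
        norm_num [hpq]
      · rw [if_neg hpq, ← ih p]
        unfold PySem.List.max?
        rw [List.foldl_cons, List.foldl_cons, List.foldl_cons]
        norm_num [hpq]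

-- pvMostCommonHead through its items list
theorem pv_head_eq (c : PySem.Dict String Int) :
    pvMostCommonHead c = (PySem.List.maxD c.items (fun t => t.2) ("", 0)).1 := by
  unfold pvMostCommonHead PySem.List.maxD
  cases h : c.items with
  | nil => rfl
  | cons p rest => rw [pv_first_max]; rfl

-- A's totals dict, as produced by the fused fold
def pvTotD (ds : List String) : PySem.Dict String Int :=
  (pvStream ds).foldl (fun d p => d.modify p.1 0 (· + p.2)) PySem.Dict.empty

theorem pv_totD_keys (l0 : String) (tl : List String) :
    (pvTotD (l0 :: tl)).keys = pvCommonDelimiter := by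
  have h1 : (pvTotD (l0 :: tl)).keys =
      PySem.Set.update PySem.Dict.empty.keys ((pvStream (l0 :: tl)).map Prod.fst) :=
    PySem.Dict.keys_foldl_modify_key (pvStream (l0 :: tl)) Prod.fst 0
      (fun _ p => (· + p.2)) PySem.Dict.empty
  have h2 : (pvStream (l0 :: tl)).map Prod.fst =
      (l0 :: tl).flatMap (fun _ => pvCommonDelimiter) := by
    simp [pvStream, pvDelimiterCount, List.map_flatMap, Function.comp_def]
  rw [h1, h2]
  show PySem.Set.update [] _ = _
  rw [PySem.Set.update_nil_left, List.flatMap_cons, PySem.Set.ofList_append,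
    PySem.Set.ofList_eq_self_of_nodup _ (by decide), PySem.Set.update_eq_append_filter]
  have hnil : (PySem.Set.ofList (tl.flatMap fun _ => pvCommonDelimiter)).filter
      (fun y => !PySem.Set.contains pvCommonDelimiter y) = [] := by
    rw [List.filter_eq_nil_iff]
    intro y hy
    have : y ∈ pvCommonDelimiter := by
      have := (PySem.Set.mem_ofList _ y).mp hy
      simp only [List.mem_flatMap] at this
      exact this.choose_spec.2
    simpa using this
  rw [hnil, List.append_nil]

theorem pv_totD_nodup (ds : List String) : (pvTotD ds).keys.Nodup :=
  PySem.Dict.nodup_keys_foldl_modify_key (pvStream ds) Prod.fst 0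
    (fun _ p => (· + p.2)) PySem.Dict.empty (by simp)

theorem pv_totD_getD (ds : List String) (d : String) (hd : d ∈ pvCommonDelimiter) :
    (pvTotD ds).getD d 0 = (pvCounts ds d).sum := by
  have h1 : (pvTotD ds).getD d 0 =
      PySem.Dict.empty.getD d 0 + (((pvStream ds).filter (fun p => p.1 == d)).map (·.2)).sum :=
    pv_getD_modify_snd (pvStream ds) PySem.Dict.empty d
  rw [h1, pv_stream_filter d hd ds]
  simp [PySem.Dict.getD_empty, List.map_map, Function.comp_def]

theorem pv_totD_items (l0 : String) (tl : List String) :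
    (pvTotD (l0 :: tl)).items = pvCommonDelimiter.map (fun d => (d, (pvCounts (l0 :: tl) d).sum)) := by
  rw [PySem.Dict.items_eq_map_keys _ (pv_totD_nodup _) 0, pv_totD_keys]
  apply List.map_congr_left
  intro d hd
  rw [pv_totD_getD _ d hd]

-- the any-test over struct_counter's items, reduced to the per-delimiter count list
theorem pv_any_iff (l0 : String) (tl : List String) (d : String) (hd : d ∈ pvCommonDelimiter)
    (n : Int) :
    (((PySem.Set.ofList (pvStream (l0 :: tl))).any
        (fun k => (decide ((List.count k (pvStream (l0 :: tl)) : Int) ≠ n) || decide (k.2 = 0)) && k.1 == d)) = true)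
      ↔ ∃ c ∈ pvCounts (l0 :: tl) d,
          ((pvCounts (l0 :: tl) d).count c : Int) ≠ n ∨ c = 0 := by
  rw [List.any_eq_true]
  constructor
  · rintro ⟨k, hk, hcond⟩
    have hmem := (pv_mem_stream k _).mp ((PySem.Set.mem_ofList _ _).mp hk)
    simp only [Bool.and_eq_true, beq_iff_eq, Bool.or_eq_true, decide_eq_true_eq] at hcond
    obtain ⟨hor, hk1⟩ := hcond
    refine ⟨k.2, hk1 ▸ hmem.2, ?_⟩
    rw [← pv_stream_count d hd k.2 (l0 :: tl), show (d, k.2) = k from Prod.ext hk1.symm rfl]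
    exact hor
  · rintro ⟨c, hc, hor⟩
    refine ⟨(d, c), (PySem.Set.mem_ofList _ _).mpr ((pv_mem_stream (d, c) _).mpr ⟨hd, hc⟩), ?_⟩
    simp only [Bool.and_eq_true, beq_iff_eq, Bool.or_eq_true, decide_eq_true_eq]
    rw [pv_stream_count d hd c]
    exact ⟨hor, trivial⟩

-- the main equality, unconditionally (both ports agree on every input)
theorem pv_main (ds : List String) : check_delimiter ds = check_delimiter_alt ds := by
  cases ds with
  | nil => rfl
  | cons l0 tl =>
    have hne : (l0 :: tl : List String) ≠ [] := by simp
    have hstep := pv_fold_fuse (l0 :: tl) PySem.Dict.empty PySem.Dict.empty 0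
    have hA : check_delimiter (l0 :: tl) =
        pvMostCommonHead
          ((PySem.Dict.counter (pvStream (l0 :: tl))).items.foldl
            (pvEraseStep (((l0 :: tl).length : Nat) : Int)) (pvTotD (l0 :: tl))) := by
      simp only [check_delimiter, hstep, zero_add]
      rfl
    have hfinal : ((PySem.Dict.counter (pvStream (l0 :: tl))).items.foldl
          (pvEraseStep (((l0 :: tl).length : Nat) : Int)) (pvTotD (l0 :: tl))).items
        = (pvTotD (l0 :: tl)).items.filter
            (fun p => !((PySem.Dict.counter (pvStream (l0 :: tl))).items.any
              (fun kv => (decide (kv.2 ≠ (((l0 :: tl).length : Nat) : Int)) || decide (kv.1.2 = 0)) && kv.1.1 == p.1))) :=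
      pv_erase_fold _ _ _
    rw [PySem.Dict.items_counter, pv_totD_items, List.filter_map] at hfinal
    simp only [Function.comp_def, List.any_map] at hfinal
    have hpred : ∀ d ∈ pvCommonDelimiter,
        (!((PySem.Set.ofList (pvStream (l0 :: tl))).any
            (fun k => (decide ((List.count k (pvStream (l0 :: tl)) : Int) ≠ (((l0 :: tl).length : Nat) : Int)) ||
              decide (k.2 = 0)) && k.1 == d)))
          = decide (pvCounts (l0 :: tl) d ≠ [] ∧
              PySem.Set.len (PySem.Set.ofList (pvCounts (l0 :: tl) d)) = 1 ∧
              PySem.List.pyGetD (pvCounts (l0 :: tl) d) 0 0 ≠ 0) := by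
      intro d hd
      have hiff := pv_any_iff l0 tl d hd (((l0 :: tl).length : Nat) : Int)
      have hciff := pv_cond_iff (l0 :: tl) hne d
      cases hany : ((PySem.Set.ofList (pvStream (l0 :: tl))).any
          (fun k => (decide ((List.count k (pvStream (l0 :: tl)) : Int) ≠ (((l0 :: tl).length : Nat) : Int)) ||
            decide (k.2 = 0)) && k.1 == d)) with
      | true =>
          have hex := hiff.mp hany
          have hnotP : ¬ (pvCounts (l0 :: tl) d ≠ [] ∧
              PySem.Set.len (PySem.Set.ofList (pvCounts (l0 :: tl) d)) = 1 ∧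
              PySem.List.pyGetD (pvCounts (l0 :: tl) d) 0 0 ≠ 0) :=
            fun hP => (hciff.mpr hP) hex
          simp only [Bool.not_true, decide_eq_false hnotP]
      | false =>
          have hnotex : ¬ ∃ c ∈ pvCounts (l0 :: tl) d,
              ((pvCounts (l0 :: tl) d).count c : Int) ≠ (((l0 :: tl).length : Nat) : Int) ∨ c = 0 :=
            fun hex => by rw [hiff.mpr hex] at hany; cases hany
          have hP := hciff.mp hnotex
          simp only [Bool.not_false, decide_eq_true hP]
    rw [List.filter_congr hpred] at hfinal
    have hsurvfun : pvSurvStep (l0 :: tl) = (fun acc d =>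
        if (decide (pvCounts (l0 :: tl) d ≠ [] ∧
              PySem.Set.len (PySem.Set.ofList (pvCounts (l0 :: tl) d)) = 1 ∧
              PySem.List.pyGetD (pvCounts (l0 :: tl) d) 0 0 ≠ 0)) = true
        then acc ++ [(d, (pvCounts (l0 :: tl) d).sum)] else acc) := by
      funext acc d
      by_cases h : (pvCounts (l0 :: tl) d ≠ [] ∧
          PySem.Set.len (PySem.Set.ofList (pvCounts (l0 :: tl) d)) = 1 ∧
          PySem.List.pyGetD (pvCounts (l0 :: tl) d) 0 0 ≠ 0)
      · simp [pvSurvStep, h]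
      · simp [pvSurvStep]
    have hB : check_delimiter_alt (l0 :: tl) =
        (PySem.List.maxD
          ((pvCommonDelimiter.filter (fun d =>
              decide (pvCounts (l0 :: tl) d ≠ [] ∧
                PySem.Set.len (PySem.Set.ofList (pvCounts (l0 :: tl) d)) = 1 ∧
                PySem.List.pyGetD (pvCounts (l0 :: tl) d) 0 0 ≠ 0))).map
            (fun d => (d, (pvCounts (l0 :: tl) d).sum)))
          (fun t => t.2) ("", 0)).1 := by
      simp only [check_delimiter_alt]
      rw [show ([",", ";", ":", "|", "	"] : List String) = pvCommonDelimiter from rfl,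
        hsurvfun, PySem.List.foldl_append_if, List.nil_append]
    rw [hA, pv_head_eq, PySem.Dict.items_counter, hfinal, hB]

-- ===== VERDICT (by name: the statement is the Claim_ definition above) =====
theorem check_delimiter_spec : Claim_equal_check_delimiter := by
  intro ds _ _
  unfold Spec_check_delimiter
  exact pv_main ds
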